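-- pv_equiv track=rewrite | github.com/Monrunflash/Archimedes | word_analizer.py | qu_sound
-- ===== SOURCE A (Python) =====
-- q = ["e","i"]
--
-- def qu_sound(w):
--     newText = list()
--     i = 0
--     syll = str()
--     lenght = len(w)
--     while i < lenght:
--         if w[i] == "qu":
--             if i < (lenght):
--                 try:
--                     if w[i+1] in q:
--                         syll = w[i] + w[i+1]
--                         newText.append(syll)
--                         i += 1
--                     else:
--                         newText.append(w[i])
--                 except IndexError:
--                     pass
--         else:
--             newText.append(w[i])
--         i += 1
--     return newText
-- ===== SOURCE B (Python) =====
-- def qu_sound(w):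
--     out = []
--     pending = False
--     for x in w:
--         if pending:
--             pending = False
--             if x in ("e", "i"):
--                 out.append("qu" + x)
--                 continue
--             out.append("qu")
--         if x == "qu":
--             pending = True
--         else:
--             out.append(x)
--     return out
-- ===== Notes on version B (the rewrite author's own statement) =====
-- stated objective: simpler
-- what changed: Replaced the index-based while loop with lookahead w[i+1] and try/except IndexError by a single forward pass over the elements carrying a pending-'qu' flag (leftover pending 'qu' is naturally discarded); no index arithmetic or exception handling.
import Mathlib
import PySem

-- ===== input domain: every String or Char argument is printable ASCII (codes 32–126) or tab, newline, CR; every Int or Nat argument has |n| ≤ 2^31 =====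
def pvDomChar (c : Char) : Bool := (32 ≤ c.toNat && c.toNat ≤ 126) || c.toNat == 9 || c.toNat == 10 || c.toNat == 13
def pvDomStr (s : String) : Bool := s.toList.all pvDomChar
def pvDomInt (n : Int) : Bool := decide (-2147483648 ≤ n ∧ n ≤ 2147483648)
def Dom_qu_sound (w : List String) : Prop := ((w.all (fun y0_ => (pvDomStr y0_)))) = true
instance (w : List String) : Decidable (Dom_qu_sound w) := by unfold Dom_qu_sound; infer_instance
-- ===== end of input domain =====

-- B replaces A's index/lookahead while loop (with try/except) by a single forward pass
-- carrying a pending-'qu' flag: simpler control flow, same O(n) cost.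

-- ===== PORT A =====
def qu_sound_loop (w : List String) (i : Nat) (acc : List String) : List String :=
  if _h : i < w.length then
    if w.getD i "" = "qu" then
      if i < w.length then
        -- try: w[i+1] in q; IndexError -> pass
        match w[i+1]? with
        | some x =>
          if x = "e" ∨ x = "i" then
            qu_sound_loop w (i + 2) (acc ++ [w.getD i "" ++ x])
          else
            qu_sound_loop w (i + 1) (acc ++ [w.getD i ""])
        | none => qu_sound_loop w (i + 1) acc
      else qu_sound_loop w (i + 1) acc
    else qu_sound_loop w (i + 1) (acc ++ [w.getD i ""])
  else acc
termination_by w.length - i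

def qu_sound (w : List String) : List String := qu_sound_loop w 0 []

-- ===== PORT B =====
def qu_sound_go (pending : Bool) : List String → List String
  | [] => []
  | x :: xs =>
    if pending then
      if x = "e" ∨ x = "i" then ("qu" ++ x) :: qu_sound_go false xs
      else "qu" :: (if x = "qu" then qu_sound_go true xs else x :: qu_sound_go false xs)
    else
      if x = "qu" then qu_sound_go true xs else x :: qu_sound_go false xs

def qu_sound_alt (w : List String) : List String := qu_sound_go false w

-- ===== PRECONDITION & SPEC =====
def Spec_qu_sound (w : List String) (out : List String) : Prop := out = qu_sound_alt w
instance (w : List String) (out : List String) : Decidable (Spec_qu_sound w out) := by unfold Spec_qu_sound; infer_instance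

-- ===== CLAIM (what is proved, stated in full; the proofs are below) =====
def Claim_equal_qu_sound : Prop := ∀ (w : List String), Dom_qu_sound w → Spec_qu_sound w (qu_sound w)

-- ===== LEMMAS AND PROOFS =====

-- ===== VERDICT (by name: the statement is the Claim_ definition above) =====
theorem go_nil (p : Bool) : qu_sound_go p [] = [] := rfl

theorem go_cons_false (x : String) (xs : List String) :
    qu_sound_go false (x :: xs) =
      if x = "qu" then qu_sound_go true xs else x :: qu_sound_go false xs := rfl

theorem go_cons_true (x : String) (xs : List String) :
    qu_sound_go true (x :: xs) =
      if x = "e" ∨ x = "i" then ("qu" ++ x) :: qu_sound_go false xs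
      else "qu" :: (if x = "qu" then qu_sound_go true xs else x :: qu_sound_go false xs) := rfl

set_option maxRecDepth 8192 in
theorem loop_eq (w : List String) (n : Nat) : ∀ i acc, w.length - i ≤ n →
    qu_sound_loop w i acc = acc ++ qu_sound_go false (w.drop i) := by
  induction n with
  | zero =>
    intro i acc h
    have hi : ¬ i < w.length := by omega
    rw [qu_sound_loop]
    simp [hi, List.drop_eq_nil_of_le (by omega : w.length ≤ i), go_nil]
  | succ n ih =>
    intro i acc h
    by_cases hi : i < w.length
    · have hd : w.drop i = w[i] :: w.drop (i + 1) := List.drop_eq_getElem_cons hi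
      have hg : w.getD i "" = w[i] := List.getD_eq_getElem w "" hi
      rw [qu_sound_loop]
      simp only [hi, dif_pos, if_pos, hg]
      by_cases hq : w[i] = "qu"
      · simp only [hq, hd, go_cons_false, if_pos rfl]
        cases hx : w[i+1]? with
        | none =>
          have hlen : w.length ≤ i + 1 := by
            by_contra hc
            exact absurd hx (by simp [List.getElem?_eq_getElem (by omega : i + 1 < w.length)])
          rw [ih (i+1) acc (by omega)]
          simp [List.drop_eq_nil_of_le hlen, go_cons_true, go_nil]
        | some x =>
          have hlen : i + 1 < w.length := by
            by_contra hc
            rw [List.getElem?_eq_none (by omega)] at hx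
            simp at hx
          have hx1 : w[i+1] = x := by
            have := List.getElem?_eq_getElem hlen
            rw [hx] at this; exact (Option.some.injEq _ _).mp this.symm
          have hd2 : w.drop (i+1) = w[i+1] :: w.drop (i + 2) := List.drop_eq_getElem_cons hlen
          by_cases hv : x = "e" ∨ x = "i"
          · simp only [hx, hv, if_pos]
            rw [ih (i+2) _ (by omega)]
            simp [hd2, hx1, go_cons_true, hv]
          · simp only [hx, hv, if_neg, if_false]
            rw [ih (i+1) _ (by omega)]
            simp only [hd2, hx1, go_cons_true, hv, if_false]
            by_cases hq2 : x = "qu" <;> simp [hq2, go_cons_false, List.append_assoc]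
      · simp only [hq, if_neg, if_false]
        rw [ih (i+1) _ (by omega)]
        rw [hd, go_cons_false, if_neg hq, List.append_assoc]
        rfl
    · have hnil : w.drop i = [] := List.drop_eq_nil_of_le (by omega)
      rw [qu_sound_loop, dif_neg hi, hnil,
        show qu_sound_go false [] = [] from rfl, List.append_nil]

theorem qu_sound_spec : Claim_equal_qu_sound := by
  intro w _
  unfold Spec_qu_sound qu_sound qu_sound_alt
  simpa using loop_eq w w.length 0 [] (by omega)
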